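-- pv_equiv track=rewrite | github.com/ku-wolf/code_interview | code_interview/chapter8/boolean_evaluation.py | generate_parened
-- ===== SOURCE A (Python) =====
-- def generate_parened(exp):
--     if exp == "":
--         yield ""
--     if exp == "0":
--         yield "(0)"
--     elif exp == "1":
--         yield "(1)"
--
--
--     l_exp = ""
--     r_exp = ""
--     for i in range(0, len(exp) - 2, 2):
--         if i > 0:
--             l_exp += exp[i - 1]
--         l_exp += exp[i]
--         r_exp = exp[i + 2:]
--         hinge_op = exp[i + 1]
--
--         for p1 in generate_parened(l_exp):
--             for p2 in generate_parened(r_exp):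
--                 to_yield = ""
--                 if len(p1) > 3:
--                     to_yield += "(" + p1 + ")"
--                 else:
--                     to_yield += p1
--
--                 to_yield += hinge_op
--
--                 if len(p2) > 3:
--                     to_yield += "(" + p2 + ")"
--                 else:
--                     to_yield += p2
--
--                 yield to_yield
-- ===== SOURCE B (Python) =====
-- # Bottom-up interval DP over substring cells, shortest intervals first,
-- # instead of top-down recursion over substrings: each cell is computed once.
--
-- def _wrap(p):
--     return "(" + p + ")" if len(p) > 3 else p
--
--
-- def _cell(exp, memo, a, L):
--     """All renderings for the interval exp[a:a+L], using shorter cells in memo."""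
--     b = a + L
--     s = exp[a:b]
--     cell = []
--     if s == "":
--         cell.append("")
--     if s == "0":
--         cell.append("(0)")
--     elif s == "1":
--         cell.append("(1)")
--     for k in range(a + 1, b - 1, 2):
--         for p1 in memo[(a, k)]:
--             for p2 in memo[(k + 1, b)]:
--                 cell.append(_wrap(p1) + exp[k] + _wrap(p2))
--     return cell
--
--
-- def generate_parened(exp):
--     n = len(exp)
--     memo = {}
--     for L in range(n + 1):
--         for a in range(n - L + 1):
--             memo[(a, a + L)] = _cell(exp, memo, a, L)
--     return memo[(0, n)]
-- ===== Notes on version B (the rewrite author's own statement) =====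
-- stated objective: alternative
-- what changed: Replaces A's top-down generator recursion (which re-derives every substring's parenthesizations at each of its occurrences) with a bottom-up dynamic-programming table keyed by substring interval (a, a+L), filled in order of increasing length, so each cell is computed exactly once.
import Mathlib
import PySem

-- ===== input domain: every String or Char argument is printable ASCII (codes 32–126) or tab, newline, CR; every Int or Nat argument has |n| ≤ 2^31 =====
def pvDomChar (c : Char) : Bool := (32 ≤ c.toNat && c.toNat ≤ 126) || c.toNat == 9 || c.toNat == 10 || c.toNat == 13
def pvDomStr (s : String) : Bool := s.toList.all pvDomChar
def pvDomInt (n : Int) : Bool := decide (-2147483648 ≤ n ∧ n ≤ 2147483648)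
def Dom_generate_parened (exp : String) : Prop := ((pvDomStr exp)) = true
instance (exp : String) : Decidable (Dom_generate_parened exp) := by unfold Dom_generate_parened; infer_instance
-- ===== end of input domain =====

-- B replaces A's top-down generator recursion over substrings by a bottom-up interval-DP
-- table, each substring cell computed once (objective: alternative algorithm).  A is a
-- generator in Python; both ports return the list of its yields, built over List Char
-- with one String.ofList at the end.

-- ===== PORT A =====
-- fuel-guarded transliteration of A's recursion: every recursive call is on a strictly
-- shorter string, so fuel = length + 1 never runs out (pvGpA_fuel below proves the
-- result is fuel-independent once fuel exceeds the length).
def pvGpA : Nat → List Char → List (List Char)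
  | 0, _ => []
  | fuel + 1, e =>
    let base :=
      (if e = [] then [([] : List Char)] else []) ++
      (if e = ['0'] then [['(', '0', ')']]
       else if e = ['1'] then [['(', '1', ')']] else [])
    let r := (PySem.List.pyRange 0 (PySem.List.len e - 2) 2).foldl
      (fun st i =>
        let l_exp := (if 0 < i then st.1 ++ [PySem.List.pyGetD e (i - 1) ' '] else st.1) ++
          [PySem.List.pyGetD e i ' ']
        let r_exp := PySem.List.slice e (some (i + 2)) none
        let hinge := PySem.List.pyGetD e (i + 1) ' '
        let out := (pvGpA fuel l_exp).foldl (fun acc p1 =>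
          (pvGpA fuel r_exp).foldl (fun acc2 p2 =>
            acc2 ++ [((if 3 < p1.length then ('(' :: p1) ++ [')'] else p1) ++ [hinge]) ++
              (if 3 < p2.length then ('(' :: p2) ++ [')'] else p2)]) acc) st.2
        (l_exp, out))
      (([] : List Char), ([] : List (List Char)))
    base ++ r.2

def generate_parened (exp : String) : List String :=
  (pvGpA (exp.toList.length + 1) exp.toList).map (fun cs => String.ofList cs)

-- ===== PORT B =====
-- helper _wrap of Source B
def pvWrapB (p : List Char) : List Char :=
  if 3 < p.length then ('(' :: p) ++ [')'] else p

-- helper _cell of Source B: all renderings for the interval cs[a:a+L], read off shorter cells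
def pvCellB (cs : List Char) (memo : PySem.Dict (Int × Int) (List (List Char)))
    (a L : Int) : List (List Char) :=
  let b := a + L
  let s := PySem.List.slice cs (some a) (some b)
  let cell :=
    (if s = [] then [([] : List Char)] else []) ++
    (if s = ['0'] then [['(', '0', ')']]
     else if s = ['1'] then [['(', '1', ')']] else [])
  (PySem.List.pyRange (a + 1) (b - 1) 2).foldl
    (fun cell k =>
      -- memo.get? … .getD []: the looked-up cells are always present (Python would KeyError otherwise)
      ((memo.get? (a, k)).getD []).foldl (fun c1 p1 =>
        ((memo.get? (k + 1, b)).getD []).foldl (fun c2 p2 =>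
          c2 ++ [pvWrapB p1 ++ PySem.List.pyGetD cs k ' ' :: pvWrapB p2]) c1) cell)
    cell

def pvGpB (cs : List Char) : List (List Char) :=
  let n := cs.length
  let memo := (PySem.List.pyRange 0 ((n : Int) + 1) 1).foldl
    (fun memo L =>
      (PySem.List.pyRange 0 ((n : Int) - L + 1) 1).foldl
        (fun memo a => memo.insert (a, a + L) (pvCellB cs memo a L))
        memo)
    (PySem.Dict.empty : PySem.Dict (Int × Int) (List (List Char)))
  (memo.get? (0, (n : Int))).getD []   -- key always present (inserted at L = n, a = 0)

def generate_parened_alt (exp : String) : List String :=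
  (pvGpB exp.toList).map (fun cs => String.ofList cs)

-- ===== PRECONDITION & SPEC =====
def Spec_generate_parened (exp : String) (out : List String) : Prop := out = generate_parened_alt exp
instance (exp : String) (out : List String) : Decidable (Spec_generate_parened exp out) := by unfold Spec_generate_parened; infer_instance

-- ===== CLAIM (what is proved, stated in full; the proofs are below) =====
def Claim_equal_generate_parened : Prop := ∀ (exp : String), Dom_generate_parened exp → Spec_generate_parened exp (generate_parened exp)

-- ===== LEMMAS AND PROOFS =====

-- number of split positions of an interval of length L (Python range over the odd hinges)
def pvSplits (L : Nat) : Nat := (L - 1) / 2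

-- the base-case yields of either program on a subexpression e
def pvBaseL (e : List Char) : List (List Char) :=
  (if e = [] then [([] : List Char)] else []) ++
  (if e = ['0'] then [['(', '0', ')']]
   else if e = ['1'] then [['(', '1', ')']] else [])

-- the combined yields of the k-th split of e, children rendered by G
def pvH (e : List Char) (G : List Char → List (List Char)) (k : Nat) : List (List Char) :=
  (G (e.take (2 * k + 1))).flatMap (fun p1 =>
    (G (e.drop (2 * k + 2))).map (fun p2 =>
      pvWrapB p1 ++ (e.getD (2 * k + 1) ' ') :: pvWrapB p2))

-- A with always-sufficient fuel
def pvGA (e : List Char) : List (List Char) := pvGpA (e.length + 1) e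

-- A's split range (i = even left-end positions), re-indexed over Nat
lemma pvRangeA (L : Nat) :
    PySem.List.pyRange 0 ((L : Int) - 2) 2 =
      (List.range (pvSplits L)).map (fun k => ((2 * k : Nat) : Int)) := by
  rw [PySem.List.pyRange_of_pos _ _ (by norm_num)]
  have hc : (if (0:Int) < (L : Int) - 2 then (((L:Int) - 2 - 0 + 2 - 1)/2).toNat else 0)
      = pvSplits L := by
    unfold pvSplits; split_ifs with h <;> omega
  rw [hc]
  apply List.map_congr_left
  intro k _
  push_cast; ring

-- B's split range (k = odd hinge positions) at interval (a, a+L), re-indexed over Nat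
lemma pvRangeB (a : Int) (L : Nat) :
    PySem.List.pyRange (a + 1) (a + (L : Int) - 1) 2 =
      (List.range (pvSplits L)).map (fun k => a + ((2 * k + 1 : Nat) : Int)) := by
  rw [PySem.List.pyRange_of_pos _ _ (by norm_num)]
  have hc : (if a + 1 < a + (L : Int) - 1 then ((a + (L:Int) - 1 - (a+1) + 2 - 1)/2).toNat else 0)
      = pvSplits L := by
    unfold pvSplits; split_ifs with h <;> omega
  rw [hc]
  apply List.map_congr_left
  intro k _
  push_cast; ring

-- A's loop: the accumulated l_exp is always a prefix of e, and the yields are the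
-- per-split combinations in order
lemma pvLoopA (fuel : Nat) (e : List Char) :
    ∀ m : Nat, m ≤ pvSplits e.length →
      ((List.range m).map (fun k => ((2 * k : Nat) : Int))).foldl
        (fun st i =>
          let l_exp := (if 0 < i then st.1 ++ [PySem.List.pyGetD e (i - 1) ' '] else st.1) ++
            [PySem.List.pyGetD e i ' ']
          let r_exp := PySem.List.slice e (some (i + 2)) none
          let hinge := PySem.List.pyGetD e (i + 1) ' '
          let out := (pvGpA fuel l_exp).foldl (fun acc p1 =>
            (pvGpA fuel r_exp).foldl (fun acc2 p2 =>
              acc2 ++ [((if 3 < p1.length then ('(' :: p1) ++ [')'] else p1) ++ [hinge]) ++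
                (if 3 < p2.length then ('(' :: p2) ++ [')'] else p2)]) acc) st.2
          (l_exp, out))
        (([] : List Char), ([] : List (List Char)))
      = (e.take (2 * m - 1), (List.range m).flatMap (pvH e (pvGpA fuel))) := by
  intro m
  induction m with
  | zero => intro _; simp
  | succ m ih =>
    intro hm
    have hm' : m ≤ pvSplits e.length := by omega
    have hlen : 2 * m + 3 ≤ e.length := by
      unfold pvSplits at hm; omega
    rw [List.range_succ, List.map_append, List.foldl_append, ih hm']
    simp only [List.map_cons, List.map_nil, List.foldl_cons, List.foldl_nil]
    rw [List.flatMap_append]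
    have hgd : ∀ j : Nat, j < e.length →
        e.take j ++ [PySem.List.pyGetD e ((j : Nat) : Int) ' '] = e.take (j + 1) := by
      intro j hj
      rw [PySem.List.pyGetD_natCast, List.getD_eq_getElem e ' ' hj]
      exact List.take_append_getElem hj
    have hl : (if 0 < ((2 * m : Nat) : Int) then
          e.take (2 * m - 1) ++ [PySem.List.pyGetD e (((2 * m : Nat) : Int) - 1) ' ']
        else e.take (2 * m - 1)) ++ [PySem.List.pyGetD e ((2 * m : Nat) : Int) ' ']
        = e.take (2 * m + 1) := by
      rcases Nat.eq_zero_or_pos m with hm0 | hm0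
      · subst hm0; simp
        have h0 := hgd 0 (by omega)
        simpa using h0
      · rw [if_pos (by exact_mod_cast Nat.pos_of_ne_zero (by omega))]
        have h1 : ((2 * m : Nat) : Int) - 1 = ((2 * m - 1 : Nat) : Int) := by push_cast [hm0]; omega
        rw [h1, hgd (2 * m - 1) (by omega)]
        have h2 : 2 * m - 1 + 1 = 2 * m := by omega
        rw [h2, hgd (2 * m) (by omega)]
    rw [hl]
    have hr : PySem.List.slice e (some (((2 * m : Nat) : Int) + 2)) none = e.drop (2 * m + 2) := by
      have : ((2 * m : Nat) : Int) + 2 = ((2 * m + 2 : Nat) : Int) := by push_cast; ring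
      rw [this, PySem.List.slice_from_natCast]
    have hh : PySem.List.pyGetD e (((2 * m : Nat) : Int) + 1) ' ' = e.getD (2 * m + 1) ' ' := by
      have : ((2 * m : Nat) : Int) + 1 = ((2 * m + 1 : Nat) : Int) := by push_cast; ring
      rw [this, PySem.List.pyGetD_natCast]
    rw [hr, hh]
    simp only [PySem.List.foldl_append_singleton_eq_map, PySem.List.foldl_append_eq_flatMap]
    refine Prod.ext ?_ ?_
    · show List.take (2 * m + 1) e = List.take (2 * (m + 1) - 1) e
      have h21 : 2 * (m + 1) - 1 = 2 * m + 1 := by omega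
      rw [h21]
    · show _ = List.flatMap (pvH e (pvGpA fuel)) (List.range m) ++ _
      simp [pvH, pvWrapB, List.append_assoc]

-- one unfolding of A's body: base cases, then the per-split combinations
lemma pvGpA_unfold (fuel : Nat) (e : List Char) :
    pvGpA (fuel + 1) e =
      pvBaseL e ++ (List.range (pvSplits e.length)).flatMap (pvH e (pvGpA fuel)) := by
  simp only [pvGpA, PySem.List.len_eq]
  rw [pvRangeA, pvLoopA fuel e (pvSplits e.length) le_rfl]
  rfl

-- the result does not depend on the fuel, as long as it exceeds the length
lemma pvGpA_fuel (n : Nat) : ∀ (e : List Char), e.length ≤ n →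
    ∀ f₁ f₂, e.length < f₁ → e.length < f₂ → pvGpA f₁ e = pvGpA f₂ e := by
  induction n with
  | zero =>
    intro e hle f₁ f₂ h1 h2
    obtain ⟨a, rfl⟩ := Nat.exists_eq_succ_of_ne_zero (by omega : f₁ ≠ 0)
    obtain ⟨b, rfl⟩ := Nat.exists_eq_succ_of_ne_zero (by omega : f₂ ≠ 0)
    rw [pvGpA_unfold, pvGpA_unfold]
    have hs : pvSplits e.length = 0 := by unfold pvSplits; omega
    rw [hs]
    simp
  | succ n ih =>
    intro e hle f₁ f₂ h1 h2
    obtain ⟨a, rfl⟩ := Nat.exists_eq_succ_of_ne_zero (by omega : f₁ ≠ 0)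
    obtain ⟨b, rfl⟩ := Nat.exists_eq_succ_of_ne_zero (by omega : f₂ ≠ 0)
    rw [pvGpA_unfold, pvGpA_unfold]
    congr 1
    apply List.flatMap_congr
    intro k hk
    rw [List.mem_range] at hk
    have hsp : 2 * k + 3 ≤ e.length := by unfold pvSplits at hk; omega
    have hlt : (e.take (2 * k + 1)).length ≤ n := by
      rw [List.length_take]; omega
    have hld : (e.drop (2 * k + 2)).length ≤ n := by
      rw [List.length_drop]; omega
    unfold pvH
    rw [ih (e.take (2 * k + 1)) hlt a b
        (by rw [List.length_take]; omega) (by rw [List.length_take]; omega),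
      ih (e.drop (2 * k + 2)) hld a b
        (by rw [List.length_drop]; omega) (by rw [List.length_drop]; omega)]

lemma pvGA_unfold (e : List Char) :
    pvGA e = pvBaseL e ++ (List.range (pvSplits e.length)).flatMap (pvH e pvGA) := by
  unfold pvGA
  rw [pvGpA_unfold]
  congr 1
  apply List.flatMap_congr
  intro k hk
  rw [List.mem_range] at hk
  have hsp : 2 * k + 3 ≤ e.length := by unfold pvSplits at hk; omega
  unfold pvH
  rw [pvGpA_fuel e.length (e.take (2 * k + 1)) (by rw [List.length_take]; omega)
      e.length ((e.take (2 * k + 1)).length + 1) (by rw [List.length_take]; omega) (by omega),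
    pvGpA_fuel e.length (e.drop (2 * k + 2)) (by rw [List.length_drop]; omega)
      e.length ((e.drop (2 * k + 2)).length + 1) (by rw [List.length_drop]; omega) (by omega)]

-- B: a cell computed from correct shorter cells is A's value on that interval
lemma pvCellB_eq (cs : List Char) (memo : PySem.Dict (Int × Int) (List (List Char)))
    (a L : Nat) (hab : a + L ≤ cs.length)
    (hmem : ∀ a' L' : Nat, L' < L → a' + L' ≤ cs.length →
      memo.get? ((a' : Int), ((a' + L' : Nat) : Int)) = some (pvGA ((cs.drop a').take L'))) :
    pvCellB cs memo (a : Int) (L : Int) = pvGA ((cs.drop a).take L) := by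
  have htlen : ((cs.drop a).take L).length = L := by
    rw [List.length_take, List.length_drop]; omega
  have hs : PySem.List.slice cs (some (a : Int)) (some ((a : Int) + (L : Int))) =
      (cs.drop a).take L := PySem.List.slice_natCast_add cs a L
  simp only [pvCellB, hs]
  rw [pvRangeB, List.foldl_map]
  trans (List.range (pvSplits L)).foldl
      (fun cell k => cell ++ pvH ((cs.drop a).take L) pvGA k)
      ((if (cs.drop a).take L = [] then [([] : List Char)] else []) ++
        (if (cs.drop a).take L = ['0'] then [['(', '0', ')']]
         else if (cs.drop a).take L = ['1'] then [['(', '1', ')']] else []))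
  · apply PySem.List.foldl_congr_mem
    intro acc k hk
    rw [List.mem_range] at hk
    have hsp : 2 * k + 3 ≤ L := by unfold pvSplits at hk; omega
    have hk1 : (a : Int) + ((2 * k + 1 : Nat) : Int) = ((a + (2 * k + 1) : Nat) : Int) := by
      push_cast; ring
    have hk2 : (((a + (2 * k + 1) : Nat) : Int)) + 1 = (((a + 2 * k + 2) : Nat) : Int) := by
      push_cast; ring
    have hb2 : (a : Int) + (L : Int) = (((a + 2 * k + 2) + (L - (2 * k + 2)) : Nat) : Int) := by
      push_cast; omega
    have hm1 := hmem a (2 * k + 1) (by omega) (by omega)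
    have hm2 := hmem (a + 2 * k + 2) (L - (2 * k + 2)) (by omega) (by omega)
    rw [hk1, hm1]
    rw [hk2, hb2, hm2]
    simp only [Option.getD_some]
    have h1 : ((cs.drop a).take L).take (2 * k + 1) = (cs.drop a).take (2 * k + 1) := by
      rw [List.take_take]; congr 1; omega
    have h2 : ((cs.drop a).take L).drop (2 * k + 2)
        = (cs.drop (a + 2 * k + 2)).take (L - (2 * k + 2)) := by
      rw [List.drop_take, List.drop_drop]; congr 2
    have h3 : ((cs.drop a).take L).getD (2 * k + 1) ' '
        = PySem.List.pyGetD cs ((a + (2 * k + 1) : Nat) : Int) ' ' := by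
      rw [PySem.List.pyGetD_natCast]
      rw [List.getD_eq_getElem cs ' ' (by omega),
        List.getD_eq_getElem _ ' ' (by rw [htlen]; omega : 2 * k + 1 < ((cs.drop a).take L).length)]
      rw [List.getElem_take, List.getElem_drop]
    simp only [pvH, h1, h2, h3]
    simp only [PySem.List.foldl_append_singleton_eq_map, PySem.List.foldl_append_eq_flatMap]
  · rw [PySem.List.foldl_append_eq_flatMap, pvGA_unfold ((cs.drop a).take L), htlen]
    rfl

-- B: one row of the table (all intervals of length L) preserves and extends the invariant
lemma pvRowB (cs : List Char) (L : Nat) (memo : PySem.Dict (Int × Int) (List (List Char)))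
    (hmem : ∀ a' L' : Nat, L' < L → a' + L' ≤ cs.length →
      memo.get? ((a' : Int), ((a' + L' : Nat) : Int)) = some (pvGA ((cs.drop a').take L'))) :
    ∀ cnt : Nat, cnt + L ≤ cs.length + 1 →
      ∀ a' L' : Nat, (L' < L ∨ (L' = L ∧ a' < cnt)) → a' + L' ≤ cs.length →
        (((List.range cnt).map (fun x => ((x : Nat) : Int))).foldl
            (fun memo a => memo.insert (a, a + (L : Int)) (pvCellB cs memo a (L : Int))) memo).get?
            ((a' : Int), ((a' + L' : Nat) : Int)) = some (pvGA ((cs.drop a').take L')) := by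
  intro cnt
  induction cnt with
  | zero =>
    intro _ a' L' hcase hle
    simp only [List.range_zero, List.map_nil, List.foldl_nil]
    rcases hcase with h | ⟨_, h⟩
    · exact hmem a' L' h hle
    · omega
  | succ cnt ih =>
    intro hcnt a' L' hcase hle
    rw [List.range_succ, List.map_append, List.foldl_append]
    simp only [List.map_cons, List.map_nil, List.foldl_cons, List.foldl_nil]
    have hmem' : ∀ a' L' : Nat, L' < L → a' + L' ≤ cs.length →
        (((List.range cnt).map (fun x => ((x : Nat) : Int))).foldl
            (fun memo a => memo.insert (a, a + (L : Int)) (pvCellB cs memo a (L : Int))) memo).get?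
            ((a' : Int), ((a' + L' : Nat) : Int)) = some (pvGA ((cs.drop a').take L')) := by
      intro a'' L'' h1 h2
      exact ih (by omega) a'' L'' (Or.inl h1) h2
    have hcell := pvCellB_eq cs _ cnt L (by omega) hmem'
    by_cases hc : a' = cnt ∧ L' = L
    · obtain ⟨rfl, rfl⟩ := hc
      have hkey : ((a' : Int), ((a' + L' : Nat) : Int)) = ((a' : Int), (a' : Int) + (L' : Int)) := by
        rw [Prod.mk.injEq]; constructor
        · rfl
        · push_cast; ring
      rw [hkey, PySem.Dict.get?_insert_self, hcell]
    · have hne : ((a' : Int), ((a' + L' : Nat) : Int)) ≠ ((cnt : Int), (cnt : Int) + (L : Int)) := by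
        intro h
        have h1 : (a' : Int) = cnt := congrArg Prod.fst h
        have h2 : ((a' + L' : Nat) : Int) = (cnt : Int) + (L : Int) := congrArg Prod.snd h
        push_cast at h1 h2
        omega
      rw [PySem.Dict.get?_insert, if_neg hne]
      exact ih (by omega) a' L' (by omega) hle

-- B: the whole table is correct
lemma pvTableB (cs : List Char) :
    ∀ cnt : Nat, cnt ≤ cs.length + 1 →
      ∀ a' L' : Nat, L' < cnt → a' + L' ≤ cs.length →
        (((List.range cnt).map (fun x => ((x : Nat) : Int))).foldl
            (fun memo L =>
              (PySem.List.pyRange 0 ((cs.length : Int) - L + 1) 1).foldl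
                (fun memo a => memo.insert (a, a + L) (pvCellB cs memo a L)) memo)
            (PySem.Dict.empty : PySem.Dict (Int × Int) (List (List Char)))).get?
            ((a' : Int), ((a' + L' : Nat) : Int)) = some (pvGA ((cs.drop a').take L')) := by
  intro cnt
  induction cnt with
  | zero => intro _ a' L' h _; omega
  | succ cnt ih =>
    intro hcnt a' L' hL hle
    rw [List.range_succ, List.map_append, List.foldl_append]
    simp only [List.map_cons, List.map_nil, List.foldl_cons, List.foldl_nil]
    have hrange : PySem.List.pyRange 0 ((cs.length : Int) - (cnt : Int) + 1) 1 =
        (List.range (cs.length - cnt + 1)).map (fun x => ((x : Nat) : Int)) := by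
      rw [PySem.List.pyRange_one]
      have : (((cs.length : Int) - (cnt : Int) + 1) - 0).toNat = cs.length - cnt + 1 := by omega
      rw [this]
      apply List.map_congr_left
      intro x _
      omega
    rw [hrange]
    exact pvRowB cs cnt _ (fun a'' L'' h1 h2 => ih (by omega) a'' L'' h1 h2)
      (cs.length - cnt + 1) (by omega) a' L' (by omega) hle

lemma pvGpB_eq_pvGA (cs : List Char) : pvGpB cs = pvGA cs := by
  simp only [pvGpB]
  have hrange : PySem.List.pyRange 0 ((cs.length : Int) + 1) 1 =
      (List.range (cs.length + 1)).map (fun x => ((x : Nat) : Int)) := by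
    rw [PySem.List.pyRange_one]
    have : (((cs.length : Int) + 1) - 0).toNat = cs.length + 1 := by omega
    rw [this]
    apply List.map_congr_left
    intro x _
    omega
  rw [hrange]
  have hkey : ((0 : Int), (cs.length : Int)) = (((0 : Nat) : Int), ((0 + cs.length : Nat) : Int)) := by
    norm_num
  rw [hkey, pvTableB cs (cs.length + 1) (by omega) 0 cs.length (by omega) (by omega)]
  simp

-- ===== VERDICT (by name: the statement is the Claim_ definition above) =====
theorem generate_parened_spec : Claim_equal_generate_parened := by
  intro exp _
  unfold Spec_generate_parened generate_parened generate_parened_alt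
  rw [pvGpB_eq_pvGA]
  rfl
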